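-- pv_equiv track=rewrite | github.com/prophetstorbrianchen/leetcode | 78. Subsets.py | subsets_2
-- ===== SOURCE A (Python) =====
-- import copy
--
-- def subsets_2(nums: [int]) -> [[int]]:
--     # 不能有重複地往下走
--
--     def dfs(res):
--         result.append(copy.deepcopy(res))
--
--         for n in nums:
--             # 不重複才能向下走
--             if n not in res:
--                 # 進入下一層
--                 res.append(n)
--                 dfs(res)
--                 res.pop()
--             else:
--                 # 重複了，回上層
--                 return
--
--     result = []
--     dfs([])
--     return result
-- ===== SOURCE B (Python) =====
-- def subsets_2(nums):
--     # Iterative explicit-stack DFS instead of recursion.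
--     result = []
--     stack = [[]]
--     while stack:
--         path = stack.pop()
--         result.append(path)
--         children = []
--         for n in nums:
--             if n in path:
--                 break
--             children.append(path + [n])
--         stack.extend(reversed(children))
--     return result
-- ===== Notes on version B (the rewrite author's own statement) =====
-- stated objective: alternative
-- what changed: Replaced the recursive backtracking DFS (shared mutable path, append/recurse/pop, early return at the first duplicate) by an iterative explicit-stack preorder traversal that pops a path, records it, and pushes its children (nums scanned with break at the first element already in the path) in reverse.
import Mathlib
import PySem

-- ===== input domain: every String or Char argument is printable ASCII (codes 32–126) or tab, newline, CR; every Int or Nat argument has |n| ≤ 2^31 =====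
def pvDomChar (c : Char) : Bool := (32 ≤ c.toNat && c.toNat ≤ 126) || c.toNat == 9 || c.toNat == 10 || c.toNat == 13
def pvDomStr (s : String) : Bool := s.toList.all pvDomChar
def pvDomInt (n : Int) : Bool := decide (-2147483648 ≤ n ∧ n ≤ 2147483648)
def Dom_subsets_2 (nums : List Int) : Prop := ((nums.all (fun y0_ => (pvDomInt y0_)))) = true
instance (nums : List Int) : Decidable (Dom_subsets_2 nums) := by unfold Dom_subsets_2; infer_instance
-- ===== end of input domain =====

-- B changes the decomposition only (recursive backtracking DFS → iterative explicit-stack preorder DFS); same output, same cost.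

-- number of distinct elements of `nums` that are not yet on the path `res`
-- (termination measure for both ports' recursions)
def pvFresh (nums res : List Int) : ℕ := (nums.toFinset \ res.toFinset).card

theorem pvFresh_lt (nums res : List Int) (n : Int) (hn : n ∈ nums) (hr : n ∉ res) :
    pvFresh nums (res ++ [n]) < pvFresh nums res := by
  apply Finset.card_lt_card
  constructor
  · intro x hx
    simp only [Finset.mem_sdiff, List.mem_toFinset, List.mem_append] at hx ⊢
    exact ⟨hx.1, fun h => hx.2 (Or.inl h)⟩
  · intro hsub
    have : n ∈ nums.toFinset \ (res ++ [n]).toFinset := by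
      apply hsub
      simp [hn, hr]
    simp at this

-- ===== PORT A =====
-- literal transliteration of A's nested `dfs`: record the path, then scan `nums`;
-- on a fresh element recurse on path++[n] (append/pop become the extended-path argument),
-- on the first repeated element return (stop the scan).  `attach` only carries the
-- membership fact needed for termination.
mutual
def pvDfsA (nums res : List Int) : List (List Int) :=
  res :: pvDfsLoopA nums res nums.attach
termination_by (pvFresh nums res + 1, 0)
decreasing_by exact Prod.Lex.left _ _ (Nat.lt_succ_self _)
def pvDfsLoopA (nums res : List Int) : List {x // x ∈ nums} → List (List Int)
  | [] => []
  | ⟨n, hn⟩ :: t =>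
    if n ∈ res then []
    else pvDfsA nums (res ++ [n]) ++ pvDfsLoopA nums res t
termination_by ns => (pvFresh nums res, ns.length + 1)
decreasing_by
  · have h1 := pvFresh_lt nums res n hn (by assumption)
    rcases Nat.lt_or_ge (pvFresh nums (res ++ [n]) + 1) (pvFresh nums res) with h | h
    · exact Prod.Lex.left _ _ h
    · have h2 : pvFresh nums (res ++ [n]) + 1 = pvFresh nums res := le_antisymm h1 h
      rw [← h2]; exact Prod.Lex.right _ (Nat.succ_pos _)
  · exact Prod.Lex.right _ (Nat.lt_succ_self _)
end

def subsets_2 (nums : List Int) : List (List Int) := pvDfsA nums []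

-- ===== PORT B =====
-- values of the children of `path`: scan nums, break at the first element already on the path
def pvChildVals (path : List Int) : List Int → List Int
  | [] => []
  | n :: t => if n ∈ path then [] else n :: pvChildVals path t

theorem pvChildVals_mem (path : List Int) (ns : List Int) (n : Int)
    (h : n ∈ pvChildVals path ns) : n ∈ ns ∧ n ∉ path := by
  induction ns with
  | nil => simp [pvChildVals] at h
  | cons m t ih =>
    by_cases hm : m ∈ path
    · simp [pvChildVals, hm] at h
    · simp only [pvChildVals, if_neg hm, List.mem_cons] at h
      rcases h with rfl | h
      · exact ⟨List.mem_cons_self, hm⟩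
      · exact ⟨List.mem_cons_of_mem _ (ih h).1, (ih h).2⟩

-- potential of one stack entry / of the whole stack (termination measure for pvRunB)
def pvPot (nums : List Int) (path : List Int) : ℕ :=
  (nums.length + 1) ^ (pvFresh nums path + 1)
def pvStackPot (nums : List Int) (stack : List (List Int)) : ℕ :=
  (stack.map (pvPot nums)).sum

theorem pvRunB_dec (nums : List Int) (path : List Int) (rest : List (List Int)) :
    pvStackPot nums (((pvChildVals path nums).map (fun n => path ++ [n])) ++ rest)
      < pvStackPot nums (path :: rest) := by
  simp only [pvStackPot, List.map_append, List.sum_append, List.map_cons, List.sum_cons,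
    List.map_map]
  have hsum : ((pvChildVals path nums).map (pvPot nums ∘ fun n => path ++ [n])).sum
      < pvPot nums path := by
    have hbound : ∀ n ∈ pvChildVals path nums,
        (pvPot nums ∘ fun n => path ++ [n]) n ≤ (nums.length + 1) ^ (pvFresh nums path) := by
      intro n hn
      obtain ⟨hmem, hnot⟩ := pvChildVals_mem path nums n hn
      have hlt := pvFresh_lt nums path n hmem hnot
      simp only [Function.comp, pvPot]
      exact Nat.pow_le_pow_right (Nat.succ_le_succ (Nat.zero_le _)) (by omega)
    have hlen : (pvChildVals path nums).length ≤ nums.length := by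
      clear hbound
      induction nums with
      | nil => simp [pvChildVals]
      | cons m t ih =>
        by_cases hm : m ∈ path
        · simp [pvChildVals, hm]
        · simpa [pvChildVals, hm] using ih
    calc ((pvChildVals path nums).map (pvPot nums ∘ fun n => path ++ [n])).sum
        ≤ (pvChildVals path nums).length * (nums.length + 1) ^ (pvFresh nums path) := by
          have := List.sum_le_card_nsmul
            ((pvChildVals path nums).map (pvPot nums ∘ fun n => path ++ [n]))
            ((nums.length + 1) ^ (pvFresh nums path))
            (by intro x hx
                obtain ⟨n, hn, rfl⟩ := List.mem_map.1 hx
                exact hbound n hn)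
          simpa [smul_eq_mul, Nat.mul_comm] using this
      _ ≤ nums.length * (nums.length + 1) ^ (pvFresh nums path) :=
          Nat.mul_le_mul_right _ hlen
      _ < (nums.length + 1) * (nums.length + 1) ^ (pvFresh nums path) := by
          have : 0 < (nums.length + 1) ^ (pvFresh nums path) := Nat.pow_pos (by omega)
          exact Nat.mul_lt_mul_of_lt_of_le (Nat.lt_succ_self _) (le_refl _) this
      _ = pvPot nums path := by rw [pvPot, pow_succ]; ring
  omega

-- the explicit-stack loop of Source B: pop a path, record it, push its children (reversed in
-- Source B's array-stack = in order at the head of the Lean list-stack)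
def pvRunB (nums : List Int) (stack result : List (List Int)) : List (List Int) :=
  match stack with
  | [] => result
  | path :: rest =>
    pvRunB nums (((pvChildVals path nums).map (fun n => path ++ [n])) ++ rest) (result ++ [path])
termination_by pvStackPot nums stack
decreasing_by exact pvRunB_dec nums path rest

def subsets_2_alt (nums : List Int) : List (List Int) := pvRunB nums [[]] []

-- ===== PRECONDITION & SPEC =====
def Spec_subsets_2 (nums : List Int) (out : List (List Int)) : Prop := out = subsets_2_alt nums
instance (nums : List Int) (out : List (List Int)) : Decidable (Spec_subsets_2 nums out) := by unfold Spec_subsets_2; infer_instance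

-- ===== CLAIM (what is proved, stated in full; the proofs are below) =====
def Claim_equal_subsets_2 : Prop := ∀ (nums : List Int), Dom_subsets_2 nums → Spec_subsets_2 nums (subsets_2 nums)

-- ===== LEMMAS AND PROOFS =====

-- A's scan of `nums` produces exactly the flattened recursions over the children values
theorem pvDfsLoopA_eq (nums res : List Int) (ns : List {x // x ∈ nums}) :
    pvDfsLoopA nums res ns =
      ((pvChildVals res (ns.map Subtype.val)).map (fun n => pvDfsA nums (res ++ [n]))).flatten := by
  induction ns with
  | nil => simp [pvDfsLoopA, pvChildVals]
  | cons x t ih =>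
    obtain ⟨n, hn⟩ := x
    by_cases hr : n ∈ res
    · simp [pvDfsLoopA, pvChildVals, hr]
    · simp [pvDfsLoopA, pvChildVals, hr, ih]

theorem pvDfsA_eq (nums res : List Int) :
    pvDfsA nums res =
      res :: ((pvChildVals res nums).map (fun n => pvDfsA nums (res ++ [n]))).flatten := by
  rw [pvDfsA, pvDfsLoopA_eq]
  simp

-- invariant of the stack loop: it emits the accumulator followed by the preorder
-- traversals of every path still on the stack
theorem pvRunB_eq (nums : List Int) (stack result : List (List Int)) :
    pvRunB nums stack result = result ++ (stack.map (pvDfsA nums)).flatten := by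
  induction stack, result using pvRunB.induct nums with
  | case1 result => simp [pvRunB]
  | case2 a b c ih =>
    rw [pvRunB, ih]
    simp only [List.map_cons, List.map_append, List.flatten_append, List.flatten_cons,
      List.map_map]
    rw [pvDfsA_eq]
    simp [Function.comp_def, List.append_assoc]

-- ===== VERDICT (by name: the statement is the Claim_ definition above) =====
theorem subsets_2_spec : Claim_equal_subsets_2 := by
  intro nums _
  unfold Spec_subsets_2 subsets_2 subsets_2_alt
  rw [pvRunB_eq]
  simp
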